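-- pv_equiv track=rewrite | github.com/chinese-bbb/web-backend | tools/migrate-db/sqlite3-to-mysql.py | _backticks
-- ===== SOURCE A (Python) =====
-- def _backticks(line, in_string):
--     """
--     Replace double quotes by backticks outside (multiline) strings.
--
--     >>> _backticks('''INSERT INTO "table" VALUES ('"string"');''', False)
--     ('INSERT INTO `table` VALUES (\\'"string"\\');', False)
--
--     >>> _backticks('''INSERT INTO "table" VALUES ('"Heading''', False)
--     ('INSERT INTO `table` VALUES (\\'"Heading', True)
--
--     >>> _backticks('''* "text":http://link.com''', True)
--     ('* "text":http://link.com', True)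
--
--     >>> _backticks(" ');", True)
--     (" ');", False)
--     """
--     new = ''
--     for c in line:
--         if not in_string:
--             if c == "'":
--                 in_string = True
--             elif c == '"':
--                 new = new + '`'
--                 continue
--         elif c == "'":
--             in_string = False
--         new = new + c
--     return new, in_string
-- ===== SOURCE B (Python) =====
-- def _backticks(line, in_string):
--     # Split on single quotes: even/odd part index tells the string-state of each part.
--     parts = line.split("'")
--     pieces = [p if in_string != (i % 2 == 1) else p.replace('"', '`')
--               for i, p in enumerate(parts)]
--     return "'".join(pieces), in_string != (len(parts) % 2 == 0)
-- ===== Notes on version B (the rewrite author's own statement) =====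
-- stated objective: faster
-- what changed: Replaces the per-character state-machine loop (with quadratic string concatenation) by splitting the line on single quotes, rewriting the parts of out-of-string parity with str.replace, and rejoining; the final state is the initial state XOR the parity of the quote count.
import Mathlib
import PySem

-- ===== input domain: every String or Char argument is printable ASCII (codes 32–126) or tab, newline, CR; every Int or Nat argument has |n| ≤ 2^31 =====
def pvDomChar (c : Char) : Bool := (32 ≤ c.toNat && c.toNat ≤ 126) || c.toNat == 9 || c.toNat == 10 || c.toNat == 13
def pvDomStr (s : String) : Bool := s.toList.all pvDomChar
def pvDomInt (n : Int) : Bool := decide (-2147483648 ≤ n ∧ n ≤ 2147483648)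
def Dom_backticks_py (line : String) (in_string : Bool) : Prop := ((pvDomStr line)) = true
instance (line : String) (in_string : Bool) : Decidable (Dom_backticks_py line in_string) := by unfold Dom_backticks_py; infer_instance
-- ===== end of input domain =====

-- B replaces A's per-character state loop by split-on-quote / parity-replace / rejoin; equivalence is total.

-- ===== PORT A =====
-- literal transliteration of A's character loop: state (new, in_string), same branch order
def backticks_py (line : String) (in_string : Bool) : String × Bool :=
  let r := line.toList.foldl
    (fun (s : List Char × Bool) c =>
      if s.2 = false then
        if c = '\'' then (s.1 ++ [c], true)
        else if c = '"' then (s.1 ++ ['`'], s.2)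
        else (s.1 ++ [c], s.2)
      else if c = '\'' then (s.1 ++ [c], false)
      else (s.1 ++ [c], s.2))
    ([], in_string)
  (String.mk r.1, r.2)

-- ===== PORT B =====
-- line.split("'") ported as List.splitOn; single-character str.replace('"','`') ported as the
-- character map (exact for one-character old/new); "'".join as List.intercalate.
def backticks_py_alt (line : String) (in_string : Bool) : String × Bool :=
  let parts := line.toList.splitOn '\''
  let pieces := parts.mapIdx (fun i p =>
    if in_string != decide (i % 2 = 1) then p
    else p.map (fun c => if c = '"' then '`' else c))
  (String.mk (List.intercalate ['\''] pieces), in_string != decide (parts.length % 2 = 0))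

-- ===== PRECONDITION & SPEC =====
def Spec_backticks_py (line : String) (in_string : Bool) (out : String × Bool) : Prop := out = backticks_py_alt line in_string
instance (line : String) (in_string : Bool) (out : String × Bool) : Decidable (Spec_backticks_py line in_string out) := by unfold Spec_backticks_py; infer_instance

-- ===== CLAIM (what is proved, stated in full; the proofs are below) =====
def Claim_equal_backticks_py : Prop := ∀ (line : String) (in_string : Bool), Dom_backticks_py line in_string → Spec_backticks_py line in_string (backticks_py line in_string)

-- ===== LEMMAS AND PROOFS =====

def btRepl (c : Char) : Char := if c = '"' then '`' else c

-- the parity-indexed mapIdx, as a structural recursion on the parts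
lemma btFlattenCons (sep : List Char) (a : Char) (x : List Char) (t : List (List Char)) :
    (List.intersperse sep ((a :: x) :: t)).flatten = a :: (List.intersperse sep (x :: t)).flatten := by
  cases t <;> simp [List.intersperse_cons₂]

def btProc (b : Bool) : List (List Char) → List (List Char)
  | [] => []
  | p :: rest => (if b then p else p.map btRepl) :: btProc (!b) rest

lemma btMapIdx_eq_proc (parts : List (List Char)) : ∀ (b : Bool),
    parts.mapIdx (fun i p => if b != decide (i % 2 = 1) then p else p.map btRepl)
      = btProc b parts := by
  induction parts with
  | nil => intro b; rfl
  | cons p rest ih =>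
    intro b
    have h1 : (fun (i : ℕ) (p : List Char) => if b != decide ((i + 1) % 2 = 1) then p else List.map btRepl p)
        = (fun (i : ℕ) (p : List Char) => if (!b) != decide (i % 2 = 1) then p else List.map btRepl p) := by
      funext i p
      rcases Nat.mod_two_eq_zero_or_one i with h | h <;> cases b <;> simp [Nat.add_mod, h]
    simp only [List.mapIdx_cons, btProc, h1, ih]
    cases b <;> simp

lemma btMain (cs : List Char) : ∀ (b : Bool) (acc : List Char),
    cs.foldl
      (fun (s : List Char × Bool) c =>
        if s.2 = false then
          if c = '\'' then (s.1 ++ [c], true)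
          else if c = '"' then (s.1 ++ ['`'], s.2)
          else (s.1 ++ [c], s.2)
        else if c = '\'' then (s.1 ++ [c], false)
        else (s.1 ++ [c], s.2))
      (acc, b)
    = (acc ++ List.intercalate ['\''] (btProc b (cs.splitOn '\'')),
       b != decide ((cs.splitOn '\'').length % 2 = 0)) := by
  induction cs with
  | nil => intro b acc; cases b <;> simp [List.splitOn_nil, btProc, List.intercalate]
  | cons c cs ih =>
    intro b acc
    have hne : cs.splitOn '\'' ≠ [] := List.splitOnP_ne_nil _ _
    obtain ⟨s0, S1, hS⟩ := List.exists_cons_of_ne_nil hne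
    by_cases hc : c = '\''
    · subst hc
      have hsplit : ('\'' :: cs).splitOn '\'' = [] :: cs.splitOn '\'' := by
        simp [List.splitOn, List.splitOnP_cons]
      rw [List.foldl_cons]
      have hstep : (if b = false then
            if '\'' = '\'' then (acc ++ ['\''], true)
            else if '\'' = '"' then (acc ++ ['`'], b) else (acc ++ ['\''], b)
          else if '\'' = '\'' then (acc ++ ['\''], false) else (acc ++ ['\''], b))
          = (acc ++ ['\''], !b) := by cases b <;> simp
      rw [hstep, ih (!b) (acc ++ ['\''])]
      rw [hsplit, hS]
      simp only [Prod.mk.injEq]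
      constructor
      · cases b <;>
          simp [btProc, List.intercalate, List.intersperse_cons₂]
      · rcases Nat.mod_two_eq_zero_or_one (S1.length) with h | h <;>
          cases b <;> simp [Nat.add_mod, h]
    · have hsplit : (c :: cs).splitOn '\'' = (cs.splitOn '\'').modifyHead (List.cons c) := by
        simp [List.splitOn, List.splitOnP_cons, hc]
      rw [List.foldl_cons]
      have hstep : (if b = false then
            if c = '\'' then (acc ++ [c], true)
            else if c = '"' then (acc ++ ['`'], b) else (acc ++ [c], b)
          else if c = '\'' then (acc ++ [c], false) else (acc ++ [c], b))
          = (acc ++ [if b then c else btRepl c], b) := by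
        by_cases hq : c = '"' <;> cases b <;> simp [hc, hq, btRepl]
      rw [hstep, ih b (acc ++ [if b then c else btRepl c])]
      rw [hsplit, hS]
      simp only [Prod.mk.injEq]
      constructor
      · cases b <;> simp [btProc, List.intercalate, btFlattenCons]
      · simp

-- ===== VERDICT (by name: the statement is the Claim_ definition above) =====
theorem backticks_py_spec : Claim_equal_backticks_py := by
  intro line in_string _
  unfold Spec_backticks_py backticks_py backticks_py_alt
  dsimp only
  have hr : (fun c => if c = '\"' then '`' else c) = btRepl := rfl
  rw [hr, btMapIdx_eq_proc, btMain]
  simp
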